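-- pv_equiv track=rewrite | github.com/martinhova01/knowit_kodekalender | 24/16/main.py | can_sleep
-- ===== SOURCE A (Python) =====
-- def can_sleep(i: int, sviller: str, bakke: str, alv: dict):
--     # Dersom hele underlaget er jord og det ikke er noen sviller kan han fint sove der også.
--     alv_length = sum(alv.values())
--     if (
--         all(bakke[i + j] == "j" for j in range(alv_length))
--         and not any(sviller[i + j] == "*" for j in range(alv_length))
--     ):
--         return True
--
--     # Han vil ha minst én sville som pute under hodet.
--     head_offset = alv_length- alv["H"]
--     if not any(sviller[i + head_offset + j] == "*" for j in range(alv["H"])):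
--         return False
--
--     # Han liker ikke å ha noe trykkende på nakken, ingen sviller der.
--     neck_offset = alv_length - alv["N"] - alv["H"]
--     if any(sviller[i + neck_offset + j] == "*" for j in range(alv["N"])):
--         return False
--
--     # Selvfølgelig liker han heller ikke sand i nakken!
--     if any(bakke[i + neck_offset + j] == "s" for j in range(alv["N"])):
--         return False
--
--     # Han kan ha opp til én sville under bena som støtte.
--     c = 0
--     for j in range(alv["B"]):
--         if sviller[i + j] == "*":
--             c += 1
--     if c > 1:
--         return False
--
--     # Han liker ikke grus! Det kan ikke være grus på noen del av underlaget, også under sviller.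
--     if any(bakke[i + j] == "g" for j in range(alv_length)):
--         return False
--
--     return True
-- ===== SOURCE B (Python) =====
-- def can_sleep(i: int, sviller: str, bakke: str, alv: dict):
--     # One left-to-right pass over the elf's window accumulating all region
--     # facts, then the decision ladder on the accumulated flags.
--     alv_length = sum(alv.values())
--     head = alv.get("H", 0)
--     neck = alv.get("N", 0)
--     legs = alv.get("B", 0)
--     head_lo = alv_length - head
--     neck_lo = alv_length - head - neck
--     all_jord = True
--     any_sville = False
--     head_sville = False
--     neck_sville = False
--     neck_sand = False
--     leg_count = 0
--     any_grus = False
--     for j in range(alv_length):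
--         sc = sviller[i + j]
--         bc = bakke[i + j]
--         if bc != "j":
--             all_jord = False
--         if sc == "*":
--             any_sville = True
--             if head_lo <= j:
--                 head_sville = True
--             if neck_lo <= j < head_lo:
--                 neck_sville = True
--             if j < legs:
--                 leg_count += 1
--         if bc == "s" and neck_lo <= j < head_lo:
--             neck_sand = True
--         if bc == "g":
--             any_grus = True
--     if all_jord and not any_sville:
--         return True
--     if not head_sville:
--         return False
--     if neck_sville:
--         return False
--     if neck_sand:
--         return False
--     if leg_count > 1:
--         return False
--     if any_grus:
--         return False
--     return True
-- ===== Notes on version B (the rewrite author's own statement) =====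
-- stated objective: alternative
-- what changed: A makes six separate lazy generator scans over overlapping index ranges (whole window twice, head, neck twice, legs); B makes one left-to-right pass over the window accumulating all seven region facts (all-jord, any-sville, head/neck sville, neck sand, leg-sville count, any grus) and then applies the same decision ladder to the flags.
-- outside the precondition, e.g. on can_sleep(0, 'x*', 's', {'H': 1, 'N': 1, 'B': 0}): A returns False, B raises IndexError; on can_sleep(3, 'x**.**x.', 'sjg.jss', {'H': 5, 'N': -1, 'B': 2, 'x': -5}): A returns True, B returns False
import Mathlib
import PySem

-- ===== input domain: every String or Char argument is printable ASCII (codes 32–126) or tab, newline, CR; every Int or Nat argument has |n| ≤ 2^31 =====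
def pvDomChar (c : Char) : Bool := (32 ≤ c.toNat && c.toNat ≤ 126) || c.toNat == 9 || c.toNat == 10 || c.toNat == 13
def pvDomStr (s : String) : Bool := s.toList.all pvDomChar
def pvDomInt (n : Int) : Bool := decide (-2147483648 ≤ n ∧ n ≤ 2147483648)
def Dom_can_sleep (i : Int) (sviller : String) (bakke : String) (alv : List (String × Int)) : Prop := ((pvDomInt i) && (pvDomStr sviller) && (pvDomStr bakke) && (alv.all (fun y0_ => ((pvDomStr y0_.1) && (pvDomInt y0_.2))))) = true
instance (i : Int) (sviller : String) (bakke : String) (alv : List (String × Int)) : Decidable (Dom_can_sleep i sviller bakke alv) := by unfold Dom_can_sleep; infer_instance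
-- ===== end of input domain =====

-- B replaces A's six separate region scans by one left-to-right pass over the elf's
-- window that accumulates all region flags, then applies the same decision ladder
-- (alternative decomposition, same asymptotic cost).


-- ===== PORT A =====
def can_sleep (i : Int) (sviller : String) (bakke : String) (alv : List (String × Int)) : Bool :=
  let alvLength : Int := (alv.map (fun p => p.2)).sum
  let js := PySem.List.pyRange 0 alvLength 1
  if js.all (fun j => (PySem.Str.pyGet? bakke (i + j)).getD ' ' == 'j')
      && !(js.any (fun j => (PySem.Str.pyGet? sviller (i + j)).getD ' ' == '*')) then
    true
  else
    let alvH := (alv.lookup "H").getD 0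
    let headOffset := alvLength - alvH
    if !((PySem.List.pyRange 0 alvH 1).any
        (fun j => (PySem.Str.pyGet? sviller (i + headOffset + j)).getD ' ' == '*')) then
      false
    else
      let alvN := (alv.lookup "N").getD 0
      let neckOffset := alvLength - alvN - alvH
      if (PySem.List.pyRange 0 alvN 1).any
          (fun j => (PySem.Str.pyGet? sviller (i + neckOffset + j)).getD ' ' == '*') then
        false
      else if (PySem.List.pyRange 0 alvN 1).any
          (fun j => (PySem.Str.pyGet? bakke (i + neckOffset + j)).getD ' ' == 's') then
        false
      else
        let alvB := (alv.lookup "B").getD 0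
        let c := (PySem.List.pyRange 0 alvB 1).foldl
          (fun c j => if (PySem.Str.pyGet? sviller (i + j)).getD ' ' == '*' then c + 1 else c) (0 : Int)
        if c > 1 then false
        else if js.any (fun j => (PySem.Str.pyGet? bakke (i + j)).getD ' ' == 'g') then false
        else true

-- ===== PORT B =====
-- the decision ladder of Source B, applied to the accumulated flags
def pvLadder (allJord anySville headSville neckSville neckSand : Bool) (legCount : Int) (anyGrus : Bool) : Bool :=
  if allJord && !anySville then true
  else if !headSville then false
  else if neckSville then false
  else if neckSand then false
  else if legCount > 1 then false
  else if anyGrus then false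
  else true

def can_sleep_alt (i : Int) (sviller : String) (bakke : String) (alv : List (String × Int)) : Bool :=
  let alvLength : Int := (alv.map (fun p => p.2)).sum
  let head := (alv.lookup "H").getD 0
  let neck := (alv.lookup "N").getD 0
  let legs := (alv.lookup "B").getD 0
  let headLo := alvLength - head
  let neckLo := alvLength - head - neck
  let st := (PySem.List.pyRange 0 alvLength 1).foldl
    (fun s j =>
      ((if (PySem.Str.pyGet? bakke (i + j)).getD ' ' != 'j' then false else s.1),
       (if (PySem.Str.pyGet? sviller (i + j)).getD ' ' == '*' then true else s.2.1),
       (if (PySem.Str.pyGet? sviller (i + j)).getD ' ' == '*' && decide (headLo ≤ j) then true else s.2.2.1),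
       (if (PySem.Str.pyGet? sviller (i + j)).getD ' ' == '*' && (decide (neckLo ≤ j) && decide (j < headLo)) then true else s.2.2.2.1),
       (if (PySem.Str.pyGet? bakke (i + j)).getD ' ' == 's' && (decide (neckLo ≤ j) && decide (j < headLo)) then true else s.2.2.2.2.1),
       (if (PySem.Str.pyGet? sviller (i + j)).getD ' ' == '*' && decide (j < legs) then s.2.2.2.2.2.1 + 1 else s.2.2.2.2.2.1),
       (if (PySem.Str.pyGet? bakke (i + j)).getD ' ' == 'g' then true else s.2.2.2.2.2.2)))
    (true, false, false, false, false, (0 : Int), false)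
  pvLadder st.1 st.2.1 st.2.2.1 st.2.2.2.1 st.2.2.2.2.1 st.2.2.2.2.2.1 st.2.2.2.2.2.2

-- ===== PRECONDITION & SPEC =====
-- On a nonempty window (0 < L) Pre_ excludes the inputs on which Python A raises (a
-- missing "H"/"N"/"B" key, or the elf's window reaching outside either string), and
-- restricts to the task's natural domain: nonnegative body-part lengths that fit inside
-- the window (H + N ≤ L, B ≤ L); on some excluded inputs A's lazy short-circuits
-- happen to return a value before the raising access (see the cites in claim.json).
def Pre_can_sleep (i : Int) (sviller : String) (bakke : String) (alv : List (String × Int)) : Prop :=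
  let L := (alv.map (fun p => p.2)).sum
  let H := (alv.lookup "H").getD 0
  let N := (alv.lookup "N").getD 0
  let B := (alv.lookup "B").getD 0
  0 < L →
    ((alv.lookup "H").isSome = true ∧ (alv.lookup "N").isSome = true ∧ (alv.lookup "B").isSome = true ∧
     0 ≤ H ∧ 0 ≤ N ∧ 0 ≤ B ∧ H + N ≤ L ∧ B ≤ L ∧
     -(PySem.Str.len sviller) ≤ i ∧ i + L ≤ PySem.Str.len sviller ∧
     -(PySem.Str.len bakke) ≤ i ∧ i + L ≤ PySem.Str.len bakke)

instance (i : Int) (sviller : String) (bakke : String) (alv : List (String × Int)) : Decidable (Pre_can_sleep i sviller bakke alv) := by unfold Pre_can_sleep; infer_instance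

def pvWitness_can_sleep : Int × String × String × (List (String × Int)) :=
  (0, "*.*", "jjj", [("H", 1), ("N", 1), ("B", 1)])

def Spec_can_sleep (i : Int) (sviller : String) (bakke : String) (alv : List (String × Int)) (out : Bool) : Prop := out = can_sleep_alt i sviller bakke alv
instance (i : Int) (sviller : String) (bakke : String) (alv : List (String × Int)) (out : Bool) : Decidable (Spec_can_sleep i sviller bakke alv out) := by unfold Spec_can_sleep; infer_instance

-- ===== CLAIM (what is proved, stated in full; the proofs are below) =====
def Claim_equal_can_sleep : Prop := ∀ (i : Int) (sviller : String) (bakke : String) (alv : List (String × Int)), Dom_can_sleep i sviller bakke alv → Pre_can_sleep i sviller bakke alv → Spec_can_sleep i sviller bakke alv (can_sleep i sviller bakke alv)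

-- ===== LEMMAS AND PROOFS =====

-- closed form of B's seven-accumulator fold
theorem pvFold7 (l : List Int) (p1 p2 p3 p4 p5 p6 p7 : Int → Bool)
    (a1 a2 a3 a4 a5 : Bool) (c : Int) (a7 : Bool) :
    l.foldl (fun s j =>
      ((if p1 j then false else s.1),
       (if p2 j then true else s.2.1),
       (if p3 j then true else s.2.2.1),
       (if p4 j then true else s.2.2.2.1),
       (if p5 j then true else s.2.2.2.2.1),
       (if p6 j then s.2.2.2.2.2.1 + 1 else s.2.2.2.2.2.1),
       (if p7 j then true else s.2.2.2.2.2.2)))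
      (a1, a2, a3, a4, a5, c, a7)
    = (a1 && !l.any p1, a2 || l.any p2, a3 || l.any p3, a4 || l.any p4,
       a5 || l.any p5, c + (l.countP p6 : Int), a7 || l.any p7) := by
  induction l generalizing a1 a2 a3 a4 a5 c a7 with
  | nil => simp
  | cons x t ih =>
    simp only [List.foldl_cons, List.any_cons, List.countP_cons, ih]
    cases h1 : p1 x <;> cases h2 : p2 x <;> cases h3 : p3 x <;> cases h4 : p4 x <;>
      cases h5 : p5 x <;> cases h6 : p6 x <;> cases h7 : p7 x <;>
      simp [*] <;> omega

-- A's scan over the sub-window [off, off+n) equals B's guarded scan over the full window [0, L)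
theorem pvAnyWindow (q : Int → Bool) (i off n L : Int) (g : Int → Bool)
    (hg : ∀ j, 0 ≤ j → j < L → (g j = true ↔ (off ≤ j ∧ j < off + n)))
    (h0 : 0 ≤ off) (hL : off + n ≤ L) :
    (PySem.List.pyRange 0 n 1).any (fun j => q (i + off + j))
      = (PySem.List.pyRange 0 L 1).any (fun j => q (i + j) && g j) := by
  apply Bool.coe_iff_coe.mp
  simp only [List.any_eq_true, PySem.List.mem_pyRange_one, Bool.and_eq_true]
  constructor
  · rintro ⟨j, ⟨hj0, hjn⟩, hq⟩
    refine ⟨off + j, ⟨by omega, by omega⟩, ?_, (hg (off + j) (by omega) (by omega)).mpr (by omega)⟩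
    rw [show i + (off + j) = i + off + j from by ring]
    exact hq
  · rintro ⟨j, ⟨hj0, hjL⟩, hq, hgj⟩
    have hb := (hg j hj0 hjL).mp hgj
    refine ⟨j - off, ⟨by omega, by omega⟩, ?_⟩
    rw [show i + off + (j - off) = i + j from by ring]
    exact hq

-- A's leg count over [0, B) equals B's guarded count over the full window [0, L)
theorem pvCountWindow (q : Int → Bool) (B L : Int) (h0 : 0 ≤ B) (hBL : B ≤ L) :
    (PySem.List.pyRange 0 B 1).countP q
      = (PySem.List.pyRange 0 L 1).countP (fun j => q j && decide (j < B)) := by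
  rw [PySem.List.pyRange_one_append 0 B L h0 hBL, List.countP_append]
  have h1 : (PySem.List.pyRange 0 B 1).countP (fun j => q j && decide (j < B))
      = (PySem.List.pyRange 0 B 1).countP q := by
    apply List.countP_congr
    intro j hj
    rw [PySem.List.mem_pyRange_one] at hj
    simp [hj.2]
  have h2 : (PySem.List.pyRange B L 1).countP (fun j => q j && decide (j < B)) = 0 := by
    rw [List.countP_eq_zero]
    intro j hj
    rw [PySem.List.mem_pyRange_one] at hj
    simp only [Bool.and_eq_true, decide_eq_true_eq, not_and]
    intro _
    omega
  omega

-- the heart: A's ladder of lazy scans equals B's accumulated single pass, abstracted over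
-- the per-index tests bj (bakke = 'j'), vs (sviller = '*'), bs (bakke = 's'), bg (bakke = 'g')
theorem pvCore (i L H N Bv : Int) (bj vs bs bg : Int → Bool)
    (h0H : 0 ≤ H) (h0N : 0 ≤ N) (h0B : 0 ≤ Bv) (hHN : H + N ≤ L) (hBL : Bv ≤ L) :
    (if (PySem.List.pyRange 0 L 1).all (fun j => bj (i + j))
        && !((PySem.List.pyRange 0 L 1).any (fun j => vs (i + j))) then true
     else if !((PySem.List.pyRange 0 H 1).any (fun j => vs (i + (L - H) + j))) then false
     else if (PySem.List.pyRange 0 N 1).any (fun j => vs (i + (L - N - H) + j)) then false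
     else if (PySem.List.pyRange 0 N 1).any (fun j => bs (i + (L - N - H) + j)) then false
     else if ((PySem.List.pyRange 0 Bv 1).foldl
         (fun c j => if vs (i + j) then c + 1 else c) (0 : Int)) > 1 then false
     else if (PySem.List.pyRange 0 L 1).any (fun j => bg (i + j)) then false
     else true)
    = pvLadder
        (true && !((PySem.List.pyRange 0 L 1).any (fun j => !(bj (i + j)))))
        (false || (PySem.List.pyRange 0 L 1).any (fun j => vs (i + j)))
        (false || (PySem.List.pyRange 0 L 1).any (fun j => vs (i + j) && decide (L - H ≤ j)))
        (false || (PySem.List.pyRange 0 L 1).any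
          (fun j => vs (i + j) && (decide (L - H - N ≤ j) && decide (j < L - H))))
        (false || (PySem.List.pyRange 0 L 1).any
          (fun j => bs (i + j) && (decide (L - H - N ≤ j) && decide (j < L - H))))
        ((0 : Int) + ((PySem.List.pyRange 0 L 1).countP (fun j => vs (i + j) && decide (j < Bv)) : Int))
        (false || (PySem.List.pyRange 0 L 1).any (fun j => bg (i + j))) := by
  unfold pvLadder
  rw [List.all_eq_not_any_not]
  rw [PySem.List.foldl_if_add_one (fun j => vs (i + j))]
  rw [pvAnyWindow vs i (L - H) H L (fun j => decide (L - H ≤ j))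
      (by intro j hj0 hjL; simp only [decide_eq_true_eq]; omega) (by omega) (by omega)]
  rw [pvAnyWindow vs i (L - N - H) N L (fun j => decide (L - H - N ≤ j) && decide (j < L - H))
      (by intro j hj0 hjL; simp only [Bool.and_eq_true, decide_eq_true_eq]; omega) (by omega) (by omega)]
  rw [pvAnyWindow bs i (L - N - H) N L (fun j => decide (L - H - N ≤ j) && decide (j < L - H))
      (by intro j hj0 hjL; simp only [Bool.and_eq_true, decide_eq_true_eq]; omega) (by omega) (by omega)]
  rw [pvCountWindow (fun j => vs (i + j)) Bv L h0B hBL]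
  simp only [Bool.true_and, Bool.false_or, zero_add]

-- ===== VERDICT (by name: the statement is the Claim_ definition above) =====
theorem can_sleep_spec : Claim_equal_can_sleep := by
  intro i sviller bakke alv hdom hpre
  simp only [Pre_can_sleep] at hpre
  unfold Spec_can_sleep
  rcases le_or_gt ((alv.map (fun p => p.2)).sum) 0 with hL0 | hL0
  · simp only [can_sleep, can_sleep_alt,
      PySem.List.pyRange_one_eq_nil hL0, List.foldl_nil]
    simp [pvLadder]
  obtain ⟨hH, hN, hB, h0H, h0N, h0B, hHN, hBL, hwin⟩ := hpre hL0
  simp only [can_sleep, can_sleep_alt, pvFold7]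
  exact pvCore i ((alv.map (fun p => p.2)).sum)
    ((alv.lookup "H").getD 0) ((alv.lookup "N").getD 0) ((alv.lookup "B").getD 0)
    (fun t => (PySem.Str.pyGet? bakke t).getD ' ' == 'j')
    (fun t => (PySem.Str.pyGet? sviller t).getD ' ' == '*')
    (fun t => (PySem.Str.pyGet? bakke t).getD ' ' == 's')
    (fun t => (PySem.Str.pyGet? bakke t).getD ' ' == 'g')
    h0H h0N h0B hHN hBL
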